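-- pv_equiv track=rewrite | github.com/mattrodgers31/aoc2022 | d15/d15.py | reduce_rectangles
-- ===== SOURCE A (Python) =====
-- from math import floor
--
-- def manhattan_distance(a, b):
--     return abs(a[0] - b[0]) + abs(a[1] - b[1])
--
-- def check_rectangle(rectangle, sl):
--     x0, x1, y0, y1 = rectangle
--     corners = [(x0, y0), (x0, y1), (x1, y0), (x1, y1)]
--     for s, d in sl:
--         covered = True
--         for c in corners:
--             if manhattan_distance(s, c) > d:
--                 covered = False
--                 break
--         if covered:
--             return True
--     return False
--
-- def split(rectangle):
--     x0, x1, y0, y1 = rectangle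
--     xm = x0 + floor((x1 - x0) / 2) # Midpoint of x
--     ym = y0 + floor((y1 - y0) / 2) # Midpoint of y
--     tl = (x0,     xm, y0,     ym)
--     tr = (xm + 1, x1, y0,     ym) if x1 > xm else (xm, x1, y0, ym)
--     bl = (x0,     xm, ym + 1, y1) if y1 > ym else (x0, xm, ym, y1)
--     if x1 > xm and y1 > ym:
--         br = (xm + 1, x1, ym + 1, y1)
--     elif x1 > xm: # and y1 == ym
--         br = (xm + 1, x1, ym, y1)
--     elif y1 > ym: # and x1 == xm
--         br = (xm, x1, ym + 1, y1)
--     else: # x1 == xm and y1 == ym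
--         br = (xm, x1, ym, y1)
--     return [tl, tr, bl, br]
--
-- def reduce_rectangles(rectangle, sl, depth):
--     covered = check_rectangle(rectangle, sl)
--     if covered:
--         # Rectangle is fully covered by a sensor, beacon cannot be here
--         return None
--
--     # Recursion end condition
--     x0, x1, y0, y1 = rectangle
--     if x0 == x1 and y0 == y1: # and not covered by any sensor (must be true if we got here)
--         return (x0, y0)
--
--     # Rectangle is not fully covered by a sensor, beacon could still be here
--     new_rectangles = split(rectangle)
--     for r in new_rectangles:
--         loc = reduce_rectangles(r, sl, depth + 1)
--         if loc:
--             return loc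
--
--     return None
-- ===== SOURCE B (Python) =====
-- from math import floor
--
-- def manhattan_distance(a, b):
--     return abs(a[0] - b[0]) + abs(a[1] - b[1])
--
-- def check_rectangle(rectangle, sl):
--     x0, x1, y0, y1 = rectangle
--     corners = [(x0, y0), (x0, y1), (x1, y0), (x1, y1)]
--     for s, d in sl:
--         covered = True
--         for c in corners:
--             if manhattan_distance(s, c) > d:
--                 covered = False
--                 break
--         if covered:
--             return True
--     return False
--
-- def split(rectangle):
--     x0, x1, y0, y1 = rectangle
--     xm = x0 + floor((x1 - x0) / 2) # Midpoint of x
--     ym = y0 + floor((y1 - y0) / 2) # Midpoint of y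
--     tl = (x0,     xm, y0,     ym)
--     tr = (xm + 1, x1, y0,     ym) if x1 > xm else (xm, x1, y0, ym)
--     bl = (x0,     xm, ym + 1, y1) if y1 > ym else (x0, xm, ym, y1)
--     if x1 > xm and y1 > ym:
--         br = (xm + 1, x1, ym + 1, y1)
--     elif x1 > xm: # and y1 == ym
--         br = (xm + 1, x1, ym, y1)
--     elif y1 > ym: # and x1 == xm
--         br = (xm, x1, ym + 1, y1)
--     else: # x1 == xm and y1 == ym
--         br = (xm, x1, ym, y1)
--     return [tl, tr, bl, br]
--
-- def reduce_rectangles(rectangle, sl, depth):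
--     # Iterative depth-first search with an explicit stack instead of recursion.
--     # Children are pushed in reverse (br, bl, tr, tl) so they are popped in the
--     # original tl, tr, bl, br order; depth is unused by the search itself.
--     stack = [rectangle]
--     while stack:
--         r = stack.pop()
--         x0, x1, y0, y1 = r
--         if x0 > x1 or y0 > y1:
--             continue # empty rectangle: contains no cells
--         if check_rectangle(r, sl):
--             continue
--         if x0 == x1 and y0 == y1:
--             return (x0, y0)
--         tl, tr, bl, br = split(r)
--         stack.extend((br, bl, tr, tl))
--     return None
-- ===== Notes on version B (the rewrite author's own statement) =====
-- stated objective: alternative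
-- what changed: reduce_rectangles is rewritten from a recursive quad-tree subdivision into an iterative depth-first search over an explicit stack, pushing the four split children reversed (br, bl, tr, tl) so they are popped in A's tl, tr, bl, br order; manhattan_distance, check_rectangle and split are unchanged.
-- outside the precondition, e.g. on reduce_rectangles((0, 1, 0, -1), [((0, 0), 1), ((1, 0), 1)], 0): A returns None, B returns None
import Mathlib
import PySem

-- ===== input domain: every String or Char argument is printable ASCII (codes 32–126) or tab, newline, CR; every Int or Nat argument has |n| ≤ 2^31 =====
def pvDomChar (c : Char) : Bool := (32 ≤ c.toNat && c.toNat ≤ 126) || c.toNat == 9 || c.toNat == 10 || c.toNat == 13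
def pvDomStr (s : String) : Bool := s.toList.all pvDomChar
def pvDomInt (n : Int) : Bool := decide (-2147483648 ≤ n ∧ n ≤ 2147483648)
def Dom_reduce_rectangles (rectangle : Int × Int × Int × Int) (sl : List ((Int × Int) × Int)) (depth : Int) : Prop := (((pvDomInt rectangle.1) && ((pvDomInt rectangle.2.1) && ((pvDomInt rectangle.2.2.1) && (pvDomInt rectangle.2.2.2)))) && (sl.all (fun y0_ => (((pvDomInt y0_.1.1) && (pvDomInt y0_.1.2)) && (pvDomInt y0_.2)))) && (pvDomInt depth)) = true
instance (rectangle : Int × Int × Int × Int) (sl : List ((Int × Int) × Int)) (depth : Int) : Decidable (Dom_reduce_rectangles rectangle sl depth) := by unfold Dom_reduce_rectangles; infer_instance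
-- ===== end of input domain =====

-- B replaces A's recursive quad-tree search by an explicit-stack iterative DFS with the
-- same tl,tr,bl,br visit order (children pushed reversed); same asymptotic cost ('alternative').

-- ===== PORT A =====
-- shared helpers (identical code in Source A and Source B: manhattan_distance, check_rectangle, split)
def manhattan_distance (a b : Int × Int) : Int := |a.1 - b.1| + |a.2 - b.2|

-- the inner corner loop with its `covered`/break flag is List.all; the outer
-- first-match return is List.any (same order, same early exit)
def check_rectangle (rectangle : Int × Int × Int × Int) (sl : List ((Int × Int) × Int)) : Bool :=
  match rectangle with
  | (x0, x1, y0, y1) =>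
    let corners : List (Int × Int) := [(x0, y0), (x0, y1), (x1, y0), (x1, y1)]
    sl.any (fun sd => corners.all (fun c => !(manhattan_distance sd.1 c > sd.2)))

-- floor((x1-x0)/2) on a float is exact here (|x1-x0| ≤ 2^33 ≤ 2^53) and equals
-- Python's floor division, ported as PySem.Int.floordiv
def split (rectangle : Int × Int × Int × Int) : List (Int × Int × Int × Int) :=
  match rectangle with
  | (x0, x1, y0, y1) =>
    let xm := x0 + PySem.Int.floordiv (x1 - x0) 2
    let ym := y0 + PySem.Int.floordiv (y1 - y0) 2
    let tl := (x0, xm, y0, ym)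
    let tr := if x1 > xm then (xm + 1, x1, y0, ym) else (xm, x1, y0, ym)
    let bl := if y1 > ym then (x0, xm, ym + 1, y1) else (x0, xm, ym, y1)
    let br := if x1 > xm ∧ y1 > ym then (xm + 1, x1, ym + 1, y1)
              else if x1 > xm then (xm + 1, x1, ym, y1)
              else if y1 > ym then (xm, x1, ym + 1, y1)
              else (xm, x1, ym, y1)
    [tl, tr, bl, br]

-- A's recursion, decorated with a fuel argument purely as a totality guard
-- (on inputs where the Python terminates the fuel supplied below never runs out)
mutual
def reduceFuelA (fuel : Nat) (rectangle : Int × Int × Int × Int) (sl : List ((Int × Int) × Int)) (depth : Int) : Option (Int × Int) :=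
  if check_rectangle rectangle sl then none
  else
    match rectangle with
    | (x0, x1, y0, y1) =>
      if x0 = x1 ∧ y0 = y1 then some (x0, y0)
      else
        match fuel with
        | 0 => none
        | f + 1 => forLoopA f (split (x0, x1, y0, y1)) sl depth
  termination_by (fuel, 0)
  decreasing_by exact Prod.Lex.left _ _ (Nat.lt_succ_self _)

-- the `for r in new_rectangles` loop; `if loc:` is truthy iff loc ≠ None
def forLoopA (fuel : Nat) (rs : List (Int × Int × Int × Int)) (sl : List ((Int × Int) × Int)) (depth : Int) : Option (Int × Int) :=
  match rs with
  | [] => none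
  | r :: rest =>
    match reduceFuelA fuel r sl (depth + 1) with
    | some loc => some loc
    | none => forLoopA fuel rest sl depth
  termination_by (fuel, rs.length + 1)
  decreasing_by
    · exact Prod.Lex.right _ (Nat.succ_pos _)
    · exact Prod.Lex.right _ (by simp)
end

def reduce_rectangles (rectangle : Int × Int × Int × Int) (sl : List ((Int × Int) × Int)) (depth : Int) : Option (Int × Int) :=
  match rectangle with
  | (x0, x1, y0, y1) =>
    reduceFuelA ((x1 - x0).toNat + (y1 - y0).toNat + 1) (x0, x1, y0, y1) sl depth

-- termination facts for B's loop (cited by loopB's decreasing_by)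
lemma pow5_pos (n : Nat) : 0 < 5 ^ n := pow_pos (by norm_num) n
lemma push_lt (a S : Nat) (ha : 0 < a) : a + (a + (a + (a + S))) < a * 5 + S := by omega

-- ===== PORT B =====
-- B's while-loop over the explicit stack; each stack entry carries a fuel counter
-- purely as a Lean totality guard (never exhausted on inputs where the Python terminates)
def loopB (sl : List ((Int × Int) × Int)) (stack : List (Nat × (Int × Int × Int × Int))) : Option (Int × Int) :=
  match stack with
  | [] => none
  | (f, r) :: rest =>
    match r with
    | (x0, x1, y0, y1) =>
      if x0 > x1 ∨ y0 > y1 then loopB sl rest   -- empty rectangle: contains no cells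
      else if check_rectangle (x0, x1, y0, y1) sl then loopB sl rest
      else if x0 = x1 ∧ y0 = y1 then some (x0, y0)
      else
        match f with
        | 0 => loopB sl rest
        | f' + 1 =>
          match split (x0, x1, y0, y1) with
          | [tl, tr, bl, br] => loopB sl ((f', tl) :: (f', tr) :: (f', bl) :: (f', br) :: rest)
          | _ => none
termination_by (stack.map (fun p => 5 ^ p.1)).sum
decreasing_by
  all_goals simp only [List.map_cons, List.sum_cons, pow_succ]
  all_goals first
    | exact Nat.lt_add_of_pos_left (pow5_pos _)
    | exact push_lt _ _ (pow5_pos _)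

def reduce_rectangles_alt (rectangle : Int × Int × Int × Int) (sl : List ((Int × Int) × Int)) (depth : Int) : Option (Int × Int) :=
  match rectangle with
  | (x0, x1, y0, y1) =>
    loopB sl [((x1 - x0).toNat + (y1 - y0).toNat + 1, (x0, x1, y0, y1))]

-- ===== PRECONDITION & SPEC =====
-- Pre_ excludes degenerate rectangles (x1 < x0 or y1 < y0) that are not fully covered by a
-- single sensor: there A's recursion can never reach its unit base case and raises
-- RecursionError (where deeper coverage makes A return None nonetheless, B returns None too).
def Pre_reduce_rectangles (rectangle : Int × Int × Int × Int) (sl : List ((Int × Int) × Int)) (depth : Int) : Prop :=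
  (rectangle.1 ≤ rectangle.2.1 ∧ rectangle.2.2.1 ≤ rectangle.2.2.2) ∨
  ∃ sd ∈ sl,
    |sd.1.1 - rectangle.1| + |sd.1.2 - rectangle.2.2.1| ≤ sd.2 ∧
    |sd.1.1 - rectangle.1| + |sd.1.2 - rectangle.2.2.2| ≤ sd.2 ∧
    |sd.1.1 - rectangle.2.1| + |sd.1.2 - rectangle.2.2.1| ≤ sd.2 ∧
    |sd.1.1 - rectangle.2.1| + |sd.1.2 - rectangle.2.2.2| ≤ sd.2
instance (rectangle : Int × Int × Int × Int) (sl : List ((Int × Int) × Int)) (depth : Int) : Decidable (Pre_reduce_rectangles rectangle sl depth) := by unfold Pre_reduce_rectangles; infer_instance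

def pvWitness_reduce_rectangles : (Int × Int × Int × Int) × (List ((Int × Int) × Int)) × Int := ((0, 4, 0, 4), [((2, 2), 3)], 0)

def Spec_reduce_rectangles (rectangle : Int × Int × Int × Int) (sl : List ((Int × Int) × Int)) (depth : Int) (out : Option (Int × Int)) : Prop := out = reduce_rectangles_alt rectangle sl depth
instance (rectangle : Int × Int × Int × Int) (sl : List ((Int × Int) × Int)) (depth : Int) (out : Option (Int × Int)) : Decidable (Spec_reduce_rectangles rectangle sl depth out) := by unfold Spec_reduce_rectangles; infer_instance

-- ===== CLAIM (what is proved, stated in full; the proofs are below) =====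
def Claim_equal_reduce_rectangles : Prop := ∀ (rectangle : Int × Int × Int × Int) (sl : List ((Int × Int) × Int)) (depth : Int), Dom_reduce_rectangles rectangle sl depth → Pre_reduce_rectangles rectangle sl depth → Spec_reduce_rectangles rectangle sl depth (reduce_rectangles rectangle sl depth)

-- ===== LEMMAS AND PROOFS =====

-- Pre_'s coverage disjunct is exactly check_rectangle = true
lemma check_of_cov (x0 x1 y0 y1 : Int) (sl : List ((Int × Int) × Int))
    (h : ∃ sd ∈ sl,
      |sd.1.1 - x0| + |sd.1.2 - y0| ≤ sd.2 ∧
      |sd.1.1 - x0| + |sd.1.2 - y1| ≤ sd.2 ∧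
      |sd.1.1 - x1| + |sd.1.2 - y0| ≤ sd.2 ∧
      |sd.1.1 - x1| + |sd.1.2 - y1| ≤ sd.2) :
    check_rectangle (x0, x1, y0, y1) sl = true := by
  obtain ⟨sd, hmem, h1, h2, h3, h4⟩ := h
  simp only [check_rectangle, manhattan_distance, List.any_eq_true]
  exact ⟨sd, hmem, by simp; omega⟩

-- popping (f, r) from B's stack, for a nonempty rectangle r, behaves like running A's
-- recursion on r (any depth), falling through to the rest of the stack on None
lemma loopB_cons (sl : List ((Int × Int) × Int)) (f : Nat) :
    ∀ (x0 x1 y0 y1 : Int) (rest : List (Nat × (Int × Int × Int × Int))) (depth : Int),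
      x0 ≤ x1 → y0 ≤ y1 →
      loopB sl ((f, (x0, x1, y0, y1)) :: rest) =
        (match reduceFuelA f (x0, x1, y0, y1) sl depth with
         | some loc => some loc
         | none => loopB sl rest) := by
  induction f with
  | zero =>
    intro x0 x1 y0 y1 rest depth hx hy
    rw [loopB, reduceFuelA]
    rw [if_neg (by omega)]
    by_cases hc : check_rectangle (x0, x1, y0, y1) sl
    · simp [hc]
    · by_cases hu : x0 = x1 ∧ y0 = y1
      · obtain ⟨h1, h2⟩ := hu
        subst h1; subst h2
        simp [hc]
      · simp [hc, hu]
  | succ f ih =>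
    intro x0 x1 y0 y1 rest depth hx hy
    rw [loopB, reduceFuelA]
    rw [if_neg (by omega)]
    by_cases hc : check_rectangle (x0, x1, y0, y1) sl
    · simp [hc]
    · simp only [hc, if_false, Bool.false_eq_true]
      by_cases hu : x0 = x1 ∧ y0 = y1
      · obtain ⟨h1, h2⟩ := hu
        subst h1; subst h2
        simp [hc]
      · simp only [hu, if_false]
        have hfd2 : PySem.Int.floordiv (x1 - x0) 2 = (x1 - x0) / 2 :=
          PySem.Int.floordiv_eq_ediv_of_pos (by norm_num)
        have hfd2' : PySem.Int.floordiv (y1 - y0) 2 = (y1 - y0) / 2 :=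
          PySem.Int.floordiv_eq_ediv_of_pos (by norm_num)
        simp only [split, hfd2, hfd2']
        by_cases hxm : x1 > x0 + (x1 - x0) / 2 <;> by_cases hym : y1 > y0 + (y1 - y0) / 2 <;>
          simp only [hxm, hym, if_false, and_true, and_false, if_pos] <;>
        · rw [forLoopA, ih _ _ _ _ _ (depth + 1) (by omega) (by omega)]
          cases reduceFuelA f _ sl (depth + 1) with
          | some l => rfl
          | none =>
            rw [forLoopA, ih _ _ _ _ _ (depth + 1) (by omega) (by omega)]
            cases reduceFuelA f _ sl (depth + 1) with
            | some l => rfl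
            | none =>
              rw [forLoopA, ih _ _ _ _ _ (depth + 1) (by omega) (by omega)]
              cases reduceFuelA f _ sl (depth + 1) with
              | some l => rfl
              | none =>
                rw [forLoopA, ih _ _ _ _ _ (depth + 1) (by omega) (by omega)]
                cases reduceFuelA f _ sl (depth + 1) with
                | some l => rfl
                | none => rw [forLoopA]

-- ===== VERDICT (by name: the statement is the Claim_ definition above) =====
theorem reduce_rectangles_spec : Claim_equal_reduce_rectangles := by
  intro r sl depth _ hpre
  unfold Spec_reduce_rectangles
  obtain ⟨x0, x1, y0, y1⟩ := r
  show reduce_rectangles _ _ _ = _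
  unfold reduce_rectangles reduce_rectangles_alt
  dsimp only
  by_cases hne : x0 ≤ x1 ∧ y0 ≤ y1
  · rw [loopB_cons sl _ _ _ _ _ _ depth hne.1 hne.2]
    cases reduceFuelA _ _ sl depth with
    | some l => rfl
    | none => rw [loopB]
  · have hcov : check_rectangle (x0, x1, y0, y1) sl = true := by
      rcases hpre with h | h
      · exact absurd h hne
      · exact check_of_cov x0 x1 y0 y1 sl h
    rw [loopB, if_pos (by omega), loopB, reduceFuelA, if_pos hcov]
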